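-- pv_equiv track=rewrite | github.com/R-rhulani/selfDrive | breadthFirstSearch.py | currPosition
-- ===== SOURCE A (Python) =====
-- def currPosition(path):
--     position = set()
--     j=0
--     i=1
--     for direction in path:
--         if direction == "W":
--             i = i - 1
--
--         elif direction == "E":
--             i = i + 1
--
--         elif direction == "N":
--             j = j - 1
--
--         elif direction == "S":
--             j = j + 1
--         position.add((j, i))
--     return position
-- ===== SOURCE B (Python) =====
-- def _prefix(path, plus, minus, start):
--     # prefix sums of +1/-1 hits of the two axis characters, branch-free
--     out = [start]
--     for d in path:
--         out.append(out[-1] + (d == plus) - (d == minus))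
--     return out
--
--
-- def currPosition(path):
--     js = _prefix(path, "S", "N", 0)
--     es = _prefix(path, "E", "W", 1)
--     return set(zip(js[1:], es[1:]))
-- ===== Notes on version B (the rewrite author's own statement) =====
-- stated objective: alternative
-- what changed: Replaces A's single stateful if/elif walk with two staged, branch-free per-axis prefix-sum arrays (booleans as +1/-1) that are zipped and collected into a set afterwards.
import Mathlib
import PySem

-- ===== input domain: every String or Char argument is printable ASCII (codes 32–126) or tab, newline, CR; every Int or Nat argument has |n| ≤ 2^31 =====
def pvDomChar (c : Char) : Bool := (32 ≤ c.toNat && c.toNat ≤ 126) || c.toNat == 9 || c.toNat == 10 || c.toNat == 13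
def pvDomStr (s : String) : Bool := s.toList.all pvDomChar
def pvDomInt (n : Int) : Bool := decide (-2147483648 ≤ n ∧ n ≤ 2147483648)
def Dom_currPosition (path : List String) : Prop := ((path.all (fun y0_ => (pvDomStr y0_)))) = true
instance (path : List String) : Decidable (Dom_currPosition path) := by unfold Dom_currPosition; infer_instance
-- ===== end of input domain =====

-- B replaces A's stateful if/elif walk by two staged branch-free per-axis prefix-sum
-- arrays that are zipped and collected into a set (objective: alternative decomposition).


-- ===== PORT A =====
def currPosition (path : List String) : List (Int × Int) :=
  (path.foldl
    (fun (st : PySem.Set (Int × Int) × Int × Int) direction =>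
      let j := st.2.1
      let i := st.2.2
      let ji : Int × Int :=
        if direction == "W" then (j, i - 1)
        else if direction == "E" then (j, i + 1)
        else if direction == "N" then (j - 1, i)
        else if direction == "S" then (j + 1, i)
        else (j, i)
      (PySem.Set.add st.1 ji, ji))
    (PySem.Set.empty, 0, 1)).1

-- ===== PORT B =====
-- def _prefix(path, plus, minus, start): out=[start]; for d in path: out.append(out[-1] + (d==plus) - (d==minus)); return out
def pvPrefix (path : List String) (plus minus : String) (start : Int) : List Int :=
  path.foldl
    (fun (out : List Int) d =>
      out ++ [((PySem.List.pyGet? out (-1)).getD 0)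
              + (if d == plus then 1 else 0) - (if d == minus then 1 else 0)])
    [start]

def currPosition_alt (path : List String) : List (Int × Int) :=
  let js := pvPrefix path "S" "N" 0
  let es := pvPrefix path "E" "W" 1
  PySem.Set.ofList (List.zip (PySem.List.slice js (some 1) none) (PySem.List.slice es (some 1) none))

-- ===== PRECONDITION & SPEC =====
def Spec_currPosition (path : List String) (out : List (Int × Int)) : Prop := out = currPosition_alt path
instance (path : List String) (out : List (Int × Int)) : Decidable (Spec_currPosition path out) := by unfold Spec_currPosition; infer_instance

-- ===== CLAIM =====
def Claim_equal_currPosition : Prop := ∀ (path : List String), Dom_currPosition path → Spec_currPosition path (currPosition path)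

-- ===== LEMMAS AND PROOFS =====

-- A's per-step position update
def pvStep (j i : Int) (d : String) : Int × Int :=
  if d == "W" then (j, i - 1)
  else if d == "E" then (j, i + 1)
  else if d == "N" then (j - 1, i)
  else if d == "S" then (j + 1, i)
  else (j, i)

-- the raw sequence of positions A visits (with repeats), starting AFTER (j, i)
def pvVisits (j i : Int) : List String → List (Int × Int)
  | [] => []
  | d :: rest =>
    let p := pvStep j i d
    p :: pvVisits p.1 p.2 rest

-- the running values produced by one pvPrefix pass, after the seed
def pvScan (c : Int) (plus minus : String) : List String → List Int
  | [] => []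
  | d :: rest =>
    let c' := c + (if d == plus then 1 else 0) - (if d == minus then 1 else 0)
    c' :: pvScan c' plus minus rest

theorem pvStep_eq (j i : Int) (d : String) :
    pvStep j i d =
      (j + (if d == "S" then 1 else 0) - (if d == "N" then 1 else 0),
       i + (if d == "E" then 1 else 0) - (if d == "W" then 1 else 0)) := by
  unfold pvStep
  by_cases hW : d = "W" <;> by_cases hE : d = "E" <;> by_cases hN : d = "N" <;>
    by_cases hS : d = "S" <;> simp_all

theorem pvPrefix_fold (path : List String) (plus minus : String)
    (init : List Int) (c : Int) :
    path.foldl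
      (fun (out : List Int) d =>
        out ++ [((PySem.List.pyGet? out (-1)).getD 0)
                + (if d == plus then 1 else 0) - (if d == minus then 1 else 0)])
      (init ++ [c]) = init ++ c :: pvScan c plus minus path := by
  induction path generalizing init c with
  | nil => simp [pvScan]
  | cons d rest ih =>
    simp only [List.foldl_cons, pvScan]
    have hlast : (PySem.List.pyGet? (init ++ [c]) (-1)).getD (0 : Int) = c := by
      simp [PySem.List.pyGet?_neg_one]
    rw [hlast]
    have := ih (init ++ [c]) (c + (if d == plus then 1 else 0) - (if d == minus then 1 else 0))
    simpa using this

theorem visits_eq_zip (j i : Int) (path : List String) :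
    pvVisits j i path = List.zip (pvScan j "S" "N" path) (pvScan i "E" "W" path) := by
  induction path generalizing j i with
  | nil => simp [pvVisits, pvScan]
  | cons d rest ih =>
    simp only [pvVisits, pvScan, List.zip_cons_cons]
    simp only [pvStep_eq]
    exact congrArg _ (ih _ _)

theorem A_fold (path : List String) (s : PySem.Set (Int × Int)) (j i : Int) :
    (path.foldl
      (fun (st : PySem.Set (Int × Int) × Int × Int) direction =>
        let j := st.2.1
        let i := st.2.2
        let ji : Int × Int :=
          if direction == "W" then (j, i - 1)
          else if direction == "E" then (j, i + 1)
          else if direction == "N" then (j - 1, i)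
          else if direction == "S" then (j + 1, i)
          else (j, i)
        (PySem.Set.add st.1 ji, ji))
      (s, j, i)).1 = List.foldl PySem.Set.add s (pvVisits j i path) := by
  induction path generalizing s j i with
  | nil => simp [pvVisits]
  | cons d rest ih =>
    simp only [List.foldl_cons, pvVisits]
    exact ih _ _ _

-- ===== VERDICT =====
theorem currPosition_spec : Claim_equal_currPosition := by
  intro path _
  show currPosition path = currPosition_alt path
  unfold currPosition currPosition_alt pvPrefix
  simp only [A_fold]
  have hJ := pvPrefix_fold path "S" "N" [] 0
  have hE := pvPrefix_fold path "E" "W" [] 1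
  simp only [List.nil_append] at hJ hE
  simp only [hJ, hE, PySem.List.slice_from_one, List.tail_cons, ← visits_eq_zip]
  rw [PySem.Set.ofList_eq_foldl]
  rfl
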